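-- pv_equiv track=rewrite | github.com/brunobbbs/contabilizarte | contabilizarte/theme/templatetags/speciallinks.py | get_category_colors
-- ===== SOURCE A (Python) =====
-- CATEGORIES_COLOR_ORDERING = ['laranja', 'azul', 'verde', 'amarelo']
--
-- def get_category_colors(max_value=1):
--     import itertools
--     qtd = 0
--     for color in itertools.cycle(CATEGORIES_COLOR_ORDERING):
--         if qtd >= int(max_value):
--             break
--         qtd += 1
--         yield color
-- ===== SOURCE B (Python) =====
-- CATEGORIES_COLOR_ORDERING = ['laranja', 'azul', 'verde', 'amarelo']
--
-- def get_category_colors(max_value=1):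
--     n = max(int(max_value), 0)
--     full, rem = divmod(n, 4)
--     for _ in range(full):
--         yield from CATEGORIES_COLOR_ORDERING
--     yield from CATEGORIES_COLOR_ORDERING[:rem]
-- ===== Notes on version B (the rewrite author's own statement) =====
-- stated objective: alternative
-- what changed: Replaces the itertools.cycle per-item counting loop with a quotient/remainder decomposition: divmod(n,4) gives how many full passes of the color list to emit plus a sliced remainder.
import Mathlib
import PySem

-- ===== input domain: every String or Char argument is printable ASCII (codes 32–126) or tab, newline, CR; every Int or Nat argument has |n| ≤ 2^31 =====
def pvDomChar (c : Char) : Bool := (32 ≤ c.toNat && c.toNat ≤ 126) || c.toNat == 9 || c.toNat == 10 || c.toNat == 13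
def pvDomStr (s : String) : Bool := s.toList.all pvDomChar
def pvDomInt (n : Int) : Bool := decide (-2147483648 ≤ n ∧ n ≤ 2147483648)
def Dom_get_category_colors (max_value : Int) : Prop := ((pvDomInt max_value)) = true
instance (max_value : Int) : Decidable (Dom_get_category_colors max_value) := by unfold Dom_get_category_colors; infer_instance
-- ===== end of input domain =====

-- B differs by decomposition only (divmod into full passes + a sliced remainder); same values, same order.

-- ===== PORT A =====
def CATEGORIES_COLOR_ORDERING : List String := ["laranja", "azul", "verde", "amarelo"]

-- A's for-loop over itertools.cycle: take one color from the remaining tail, restart the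
-- fixed list when exhausted, stop after yielding int(max_value) (clamped to 0) items.
def pvCycleTake : Nat → List String → List String
  | 0, _ => []
  | n+1, [] => "laranja" :: pvCycleTake n ["azul", "verde", "amarelo"]
  | n+1, x :: xs => x :: pvCycleTake n xs

def get_category_colors (max_value : Int) : List String :=
  pvCycleTake max_value.toNat CATEGORIES_COLOR_ORDERING

-- ===== PORT B =====
def get_category_colors_alt (max_value : Int) : List String :=
  let n : Int := max max_value 0
  let full : Int := PySem.Int.floordiv n 4
  let rem : Int := PySem.Int.mod n 4
  ((List.range full.toNat).foldl (fun acc _ => acc ++ CATEGORIES_COLOR_ORDERING) [])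
    ++ CATEGORIES_COLOR_ORDERING.take rem.toNat

-- ===== PRECONDITION & SPEC =====
def Spec_get_category_colors (max_value : Int) (out : List String) : Prop := out = get_category_colors_alt max_value
instance (max_value : Int) (out : List String) : Decidable (Spec_get_category_colors max_value out) := by unfold Spec_get_category_colors; infer_instance

-- ===== CLAIM (what is proved, stated in full; the proofs are below) =====
def Claim_equal_get_category_colors : Prop := ∀ (max_value : Int), Dom_get_category_colors max_value → Spec_get_category_colors max_value (get_category_colors max_value)

-- ===== LEMMAS AND PROOFS =====

theorem pvCycleTake_nil (n : Nat) :
    pvCycleTake n [] = pvCycleTake n CATEGORIES_COLOR_ORDERING := by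
  cases n with
  | zero => rfl
  | succ m => simp [pvCycleTake, CATEGORIES_COLOR_ORDERING]

theorem pvCycleTake_add_four (n : Nat) :
    pvCycleTake (n + 4) CATEGORIES_COLOR_ORDERING
      = CATEGORIES_COLOR_ORDERING ++ pvCycleTake n CATEGORIES_COLOR_ORDERING := by
  show pvCycleTake (n+1+1+1+1) _ = _
  simp [pvCycleTake, CATEGORIES_COLOR_ORDERING, pvCycleTake_nil]

theorem pvFold_succ (k : Nat) :
    (List.range (k+1)).foldl (fun acc _ => acc ++ CATEGORIES_COLOR_ORDERING) []
      = ((List.range k).foldl (fun acc _ => acc ++ CATEGORIES_COLOR_ORDERING) [])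
          ++ CATEGORIES_COLOR_ORDERING := by
  rw [List.range_succ, List.foldl_append]
  simp [List.foldl]

theorem pvFold_eq_flatten (k : Nat) :
    (List.range k).foldl (fun acc _ => acc ++ CATEGORIES_COLOR_ORDERING) []
      = (List.replicate k CATEGORIES_COLOR_ORDERING).flatten := by
  induction k with
  | zero => rfl
  | succ m ih =>
      rw [pvFold_succ, ih, List.replicate_succ' , List.flatten_append]
      simp

theorem pvFlatten_comm (m : Nat) :
    (List.replicate m CATEGORIES_COLOR_ORDERING).flatten ++ CATEGORIES_COLOR_ORDERING
      = CATEGORIES_COLOR_ORDERING ++ (List.replicate m CATEGORIES_COLOR_ORDERING).flatten := by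
  induction m with
  | zero => simp
  | succ k ih => rw [List.replicate_succ, List.flatten_cons, List.append_assoc, ih]

theorem pvCycleTake_decompose (k r : Nat) (hr : r < 4) :
    pvCycleTake (4 * k + r) CATEGORIES_COLOR_ORDERING
      = ((List.range k).foldl (fun acc _ => acc ++ CATEGORIES_COLOR_ORDERING) [])
          ++ CATEGORIES_COLOR_ORDERING.take r := by
  induction k with
  | zero =>
      interval_cases r <;> simp [pvCycleTake, CATEGORIES_COLOR_ORDERING]
  | succ m ih =>
      have h1 : 4 * (m + 1) + r = (4 * m + r) + 4 := by omega
      rw [h1, pvCycleTake_add_four, ih, pvFold_succ, pvFold_eq_flatten,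
          List.append_assoc]
      simp only [← List.append_assoc, ← pvFlatten_comm]

-- ===== VERDICT (by name: the statement is the Claim_ definition above) =====
theorem get_category_colors_spec : Claim_equal_get_category_colors := by
  intro m _
  show get_category_colors m = get_category_colors_alt m
  unfold get_category_colors get_category_colors_alt
  have hmax : (max m 0).toNat = m.toNat := by omega
  have hfd : PySem.Int.floordiv (max m 0) 4 = ((m.toNat / 4 : Nat) : Int) := by
    have h0 : (max m 0) = (m.toNat : Int) := (Int.ofNat_toNat m).symm
    rw [h0]
    exact_mod_cast PySem.Int.floordiv_natCast m.toNat 4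
  have hmd : PySem.Int.mod (max m 0) 4 = ((m.toNat % 4 : Nat) : Int) := by
    have h0 : (max m 0) = (m.toNat : Int) := (Int.ofNat_toNat m).symm
    rw [h0]
    exact_mod_cast PySem.Int.mod_natCast m.toNat 4
  simp only [hfd, hmd, Int.toNat_natCast]
  have hn : m.toNat = 4 * (m.toNat / 4) + m.toNat % 4 := by omega
  exact (congrArg (fun t => pvCycleTake t CATEGORIES_COLOR_ORDERING) hn).trans
    (pvCycleTake_decompose _ _ (by omega))
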